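-- pv_equiv track=rewrite | github.com/LeeAnnJ/MO-TSP-with-EA | Code/MOEA_D-fail/data_reader.py | read_init_info
-- ===== SOURCE A (Python) =====
-- def read_init_info(init_section):
--     lines = init_section.split('\n')
--     name = ""
--     dimension = 0
--     edge_weight_foramat = ""
--     for line in lines:
--         key,value = line.split(":")
--         key.rstrip()
--         if key=='NAME':
--             name = value.lstrip()
--         elif key=='DIMENSION':
--             dimension = int(value.lstrip())
--         elif key=='EDGE_WEIGHT_FORMAT':
--             edge_weight_foramat=value.strip()
--     return name,dimension,edge_weight_foramat
-- ===== SOURCE B (Python) =====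
-- def read_init_info(init_section):
--     pairs = []
--     for line in init_section.split('\n'):
--         key, value = line.split(':')
--         pairs.append((key, value))
--     names = [v.lstrip() for k, v in pairs if k == 'NAME']
--     dims = [int(v.lstrip()) for k, v in pairs if k == 'DIMENSION']
--     fmts = [v.strip() for k, v in pairs if k == 'EDGE_WEIGHT_FORMAT']
--     return (names[-1] if names else "",
--             dims[-1] if dims else 0,
--             fmts[-1] if fmts else "")
-- ===== Notes on version B (the rewrite author's own statement) =====
-- stated objective: alternative
-- what changed: Replaces A's single stateful loop with if/elif dispatch by staged passes: one unconditional split/unpack pass builds the (key,value) pair list, then three filtered comprehensions collect and post-process all candidates per field (parsing every DIMENSION value, so malformed ones still raise) and the last element of each list wins.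
import Mathlib
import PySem

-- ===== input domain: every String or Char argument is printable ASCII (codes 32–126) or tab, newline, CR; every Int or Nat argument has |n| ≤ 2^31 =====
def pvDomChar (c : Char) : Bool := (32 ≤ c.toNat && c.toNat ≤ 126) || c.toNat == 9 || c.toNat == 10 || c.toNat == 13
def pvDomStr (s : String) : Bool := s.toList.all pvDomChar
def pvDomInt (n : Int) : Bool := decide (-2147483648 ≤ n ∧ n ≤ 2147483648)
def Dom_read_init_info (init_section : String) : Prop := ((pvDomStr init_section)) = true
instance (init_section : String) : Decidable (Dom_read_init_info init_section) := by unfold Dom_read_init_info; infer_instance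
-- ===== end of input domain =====

-- B replaces A's single stateful if/elif loop by staged passes: split every line into a (key,value)
-- pair, then collect each field's candidates by a filtered comprehension and take the last one
-- (objective: alternative decomposition, same cost).

-- ===== PORT A =====
-- loop body of A: `key,value = line.split(":")` (ValueError on lines without exactly one ':' —
-- excluded by Pre_, the port skips them), then if/elif on key; `key.rstrip()` discards its result
-- (no-op); int() raising on a bad DIMENSION value is excluded by Pre_ (getD 0 here).
def pvStepA (acc : String × Int × String) (line : String) : String × Int × String :=
  match (PySem.Str.split? line ":").getD [] with
  | [key, value] =>
      if key = "NAME" then (PySem.Str.lstrip value, acc.2.1, acc.2.2)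
      else if key = "DIMENSION" then (acc.1, (PySem.Int.ofStr? (PySem.Str.lstrip value)).getD 0, acc.2.2)
      else if key = "EDGE_WEIGHT_FORMAT" then (acc.1, acc.2.1, PySem.Str.strip value)
      else acc
  | _ => acc

def read_init_info (init_section : String) : String × Int × String :=
  ((PySem.Str.split? init_section "\n").getD []).foldl pvStepA ("", 0, "")

-- ===== PORT B =====
-- B's first pass: `key, value = line.split(':')` — malformed lines raise ValueError (outside Pre_);
-- the port returns a junk pair there whose key matches no field.
def pvUnpack (line : String) : String × String :=
  match (PySem.Str.split? line ":").getD [] with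
  | [k, v] => (k, v)
  | _ => ("", "")

def read_init_info_alt (init_section : String) : String × Int × String :=
  let pairs := ((PySem.Str.split? init_section "\n").getD []).map pvUnpack
  let names := (pairs.filter (fun p => p.1 = "NAME")).map (fun p => PySem.Str.lstrip p.2)
  let dims := (pairs.filter (fun p => p.1 = "DIMENSION")).map
    (fun p => (PySem.Int.ofStr? (PySem.Str.lstrip p.2)).getD 0)
  let fmts := (pairs.filter (fun p => p.1 = "EDGE_WEIGHT_FORMAT")).map (fun p => PySem.Str.strip p.2)
  (names.getLast?.getD "", dims.getLast?.getD 0, fmts.getLast?.getD "")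

-- ===== PRECONDITION & SPEC =====
-- Bool shape helpers for Pre_ (inspect the input only; touch neither port)
def pvTwoParts (line : String) : Bool := ((PySem.Str.split? line ":").getD []).length == 2
def pvIsDim (line : String) : Bool := ((PySem.Str.split? line ":").getD []).head? == some "DIMENSION"
def pvDimOk (line : String) : Bool :=
  (PySem.Int.ofStr? (PySem.Str.lstrip (((PySem.Str.split? line ":").getD []).getD 1 ""))).isSome

-- Pre_ excludes exactly the inputs on which Python A raises: a line without exactly one ':'
-- (ValueError on unpack) or a DIMENSION line whose value int() rejects (ValueError).
def Pre_read_init_info (init_section : String) : Prop :=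
  ∀ line ∈ (PySem.Str.split? init_section "\n").getD [],
    pvTwoParts line = true ∧ (pvIsDim line = true → pvDimOk line = true)
instance (init_section : String) : Decidable (Pre_read_init_info init_section) := by
  unfold Pre_read_init_info; infer_instance

def pvWitness_read_init_info : String := "NAME: a1\nDIMENSION: 4\nEDGE_WEIGHT_FORMAT: FULL_MATRIX"

def Spec_read_init_info (init_section : String) (out : String × Int × String) : Prop := out = read_init_info_alt init_section
instance (init_section : String) (out : String × Int × String) : Decidable (Spec_read_init_info init_section out) := by unfold Spec_read_init_info; infer_instance

-- ===== CLAIM (what is proved, stated in full; the proofs are below) =====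
def Claim_equal_read_init_info : Prop := ∀ (init_section : String), Dom_read_init_info init_section → Pre_read_init_info init_section → Spec_read_init_info init_section (read_init_info init_section)

-- ===== LEMMAS AND PROOFS =====

-- B's extraction, as a function of a line list (proof-only helper)
def pvB (lines : List String) : String × Int × String :=
  let pairs := lines.map pvUnpack
  (((pairs.filter (fun p => p.1 = "NAME")).map (fun p => PySem.Str.lstrip p.2)).getLast?.getD "",
   ((pairs.filter (fun p => p.1 = "DIMENSION")).map
     (fun p => (PySem.Int.ofStr? (PySem.Str.lstrip p.2)).getD 0)).getLast?.getD 0,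
   ((pairs.filter (fun p => p.1 = "EDGE_WEIGHT_FORMAT")).map (fun p => PySem.Str.strip p.2)).getLast?.getD "")

theorem pvStepA_unpack (acc : String × Int × String) (line : String) :
    pvStepA acc line =
      (if (pvUnpack line).1 = "NAME" then (PySem.Str.lstrip (pvUnpack line).2, acc.2.1, acc.2.2)
       else if (pvUnpack line).1 = "DIMENSION" then
         (acc.1, (PySem.Int.ofStr? (PySem.Str.lstrip (pvUnpack line).2)).getD 0, acc.2.2)
       else if (pvUnpack line).1 = "EDGE_WEIGHT_FORMAT" then
         (acc.1, acc.2.1, PySem.Str.strip (pvUnpack line).2)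
       else acc) := by
  unfold pvStepA pvUnpack
  rcases hp : (PySem.Str.split? line ":").getD [] with _ | ⟨k, _ | ⟨v, _ | _⟩⟩ <;> simp

theorem pvB_snoc (lines : List String) (x : String) :
    pvB (lines ++ [x]) = pvStepA (pvB lines) x := by
  rw [pvStepA_unpack]
  unfold pvB
  by_cases h1 : (pvUnpack x).1 = "NAME" <;>
    by_cases h2 : (pvUnpack x).1 = "DIMENSION" <;>
      by_cases h3 : (pvUnpack x).1 = "EDGE_WEIGHT_FORMAT" <;>
        simp [h1, h2, h3, List.filter_append, List.map_append, List.getLast?_append]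

theorem pvFold_eq_pvB (lines : List String) :
    lines.foldl pvStepA ("", 0, "") = pvB lines := by
  induction lines using List.reverseRecOn with
  | nil => rfl
  | append_singleton l x ih => rw [List.foldl_append, List.foldl_cons, List.foldl_nil, ih, pvB_snoc]

-- ===== VERDICT (by name: the statement is the Claim_ definition above) =====
theorem read_init_info_spec : Claim_equal_read_init_info := by
  intro s _ _
  unfold Spec_read_init_info read_init_info read_init_info_alt
  rw [pvFold_eq_pvB]
  rfl
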